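-- pv_equiv track=rewrite | github.com/Sudoite/ctf-writeups | PicoCTF2018/misc/scriptme/solve-script-me.py | get_a_token
-- ===== SOURCE A (Python) =====
-- def get_a_token(formula):
-- 	i = 0
-- 	token = ''
-- 	while i < len(formula) and formula[i] in '()':
-- 		char = formula[i]
-- 		token += char
-- 		i += 1
-- 	# Space over to start of next token
-- 	while i < len(formula) and formula[i] not in '()':
-- 		i += 1
-- 	# truncate formula
-- 	if i < len(formula):
-- 		formula = formula[i:len(formula)]
-- 	else:
-- 		formula = ''
-- 	return token, formula
-- ===== SOURCE B (Python) =====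
-- def get_a_token(formula):
--     # Declarative: lstrip consumes the leading paren run, next()/enumerate
--     # finds the next paren; no hand-written index-advancing loops.
--     rest = formula.lstrip('()')
--     token = formula[:len(formula) - len(rest)]
--     i = next((k for k, c in enumerate(rest) if c in '()'), len(rest))
--     return token, rest[i:]
-- ===== Notes on version B (the rewrite author's own statement) =====
-- stated objective: idiomatic
-- what changed: Replaced the two index-advancing while loops by a declarative formulation: str.lstrip with the paren characters consumes the leading paren run (the token by length difference) and next() over enumerate finds the start of the next token.
import Mathlib
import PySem

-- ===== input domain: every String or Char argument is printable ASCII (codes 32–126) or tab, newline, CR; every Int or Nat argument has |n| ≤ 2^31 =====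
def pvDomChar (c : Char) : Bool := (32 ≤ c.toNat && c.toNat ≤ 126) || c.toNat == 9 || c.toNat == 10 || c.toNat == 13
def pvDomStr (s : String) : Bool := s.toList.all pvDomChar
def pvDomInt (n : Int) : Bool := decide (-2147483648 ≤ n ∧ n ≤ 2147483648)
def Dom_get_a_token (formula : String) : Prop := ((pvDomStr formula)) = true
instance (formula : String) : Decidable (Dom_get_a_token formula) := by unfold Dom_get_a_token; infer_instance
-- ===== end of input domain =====

-- B replaces A's two index-advancing while loops by a declarative lstrip-of-parens + next()/enumerate scan.

-- ===== PORT A =====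
-- first while loop: collect leading '('/')' chars into token, advancing i
def gatLoop1 (cs : List Char) (i : Nat) (token : List Char) : Nat × List Char :=
  if h : i < cs.length then
    if cs[i] = '(' ∨ cs[i] = ')' then
      gatLoop1 cs (i + 1) (token ++ [cs[i]])
    else (i, token)
  else (i, token)
termination_by cs.length - i

-- second while loop: advance i past non-paren chars
def gatLoop2 (cs : List Char) (i : Nat) : Nat :=
  if h : i < cs.length then
    if ¬ (cs[i] = '(' ∨ cs[i] = ')') then gatLoop2 cs (i + 1)
    else i
  else i
termination_by cs.length - i

def get_a_token (formula : String) : String × String :=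
  let cs := formula.toList
  let p := gatLoop1 cs 0 []
  let i2 := gatLoop2 cs p.1
  let rest : List Char :=
    if i2 < cs.length then PySem.List.slice cs (some (i2 : Int)) (some (cs.length : Int))
    else []
  (String.ofList p.2, String.ofList rest)

-- ===== PORT B =====
-- predicate: char is a paren (membership test against the two paren characters)
def gatP (c : Char) : Bool := c = '(' || c = ')'

def get_a_token_alt (formula : String) : String × String :=
  let cs := formula.toList
  -- formula.lstrip with the paren chars: drop the leading run of chars from the paren set (exact)
  let rest := cs.dropWhile gatP
  let token := cs.take (cs.length - rest.length)
  -- next() over enumerate with paren test, default len(rest): first paren index, or length (exact: findIdx returns length when no match)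
  let i := rest.findIdx gatP
  (String.ofList token, String.ofList (rest.drop i))

-- ===== PRECONDITION & SPEC =====
def Spec_get_a_token (formula : String) (out : String × String) : Prop := out = get_a_token_alt formula
instance (formula : String) (out : String × String) : Decidable (Spec_get_a_token formula out) := by unfold Spec_get_a_token; infer_instance

-- ===== CLAIM (what is proved, stated in full; the proofs are below) =====
def Claim_equal_get_a_token : Prop := ∀ (formula : String), Dom_get_a_token formula → Spec_get_a_token formula (get_a_token formula)

-- ===== LEMMAS AND PROOFS =====

theorem gatP_iff (c : Char) : gatP c = true ↔ (c = '(' ∨ c = ')') := by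
  simp [gatP]

-- A's first loop collects the takeWhile of the remaining suffix
theorem gatLoop1_eq (cs : List Char) (i : Nat) (token : List Char) :
    gatLoop1 cs i token =
      (i + ((cs.drop i).takeWhile gatP).length, token ++ (cs.drop i).takeWhile gatP) := by
  by_cases h : i < cs.length
  · have hdrop : cs.drop i = cs[i] :: cs.drop (i + 1) := List.drop_eq_getElem_cons h
    by_cases hc : cs[i] = '(' ∨ cs[i] = ')'
    · rw [gatLoop1]
      rw [dif_pos h, if_pos hc]
      rw [gatLoop1_eq cs (i + 1) (token ++ [cs[i]])]
      rw [hdrop]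
      have hgp : gatP cs[i] = true := (gatP_iff _).2 hc
      rw [List.takeWhile_cons, if_pos hgp]
      simp
      omega
    · rw [gatLoop1]
      rw [dif_pos h, if_neg hc]
      rw [hdrop]
      have : gatP cs[i] = false := by
        rw [Bool.eq_false_iff]
        simp [gatP_iff, hc]
      rw [List.takeWhile_cons, if_neg (by simp [this])]
      simp
  · have : cs.drop i = [] := List.drop_eq_nil_of_le (by omega)
    rw [gatLoop1]
    simp [h, this]
termination_by cs.length - i

-- A's second loop advances by the index of the first paren
theorem gatLoop2_eq (cs : List Char) (i : Nat) :
    gatLoop2 cs i = i + (cs.drop i).findIdx gatP := by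
  by_cases h : i < cs.length
  · have hdrop : cs.drop i = cs[i] :: cs.drop (i + 1) := List.drop_eq_getElem_cons h
    by_cases hc : cs[i] = '(' ∨ cs[i] = ')'
    · rw [gatLoop2]
      rw [dif_pos h, if_neg (not_not_intro hc)]
      rw [hdrop]
      rw [List.findIdx_cons]
      simp [(gatP_iff _).2 hc]
    · rw [gatLoop2]
      rw [dif_pos h, if_pos hc]
      rw [gatLoop2_eq cs (i + 1)]
      rw [hdrop, List.findIdx_cons]
      have : gatP cs[i] = false := by
        rw [Bool.eq_false_iff]
        simp [gatP_iff, hc]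
      simp [this]
      omega
  · have : cs.drop i = [] := List.drop_eq_nil_of_le (by omega)
    rw [gatLoop2]
    simp [h, this, List.findIdx_nil]
termination_by cs.length - i

-- ===== VERDICT (by name: the statement is the Claim_ definition above) =====
theorem get_a_token_spec : Claim_equal_get_a_token := by
  intro formula _
  unfold Spec_get_a_token get_a_token get_a_token_alt
  set cs := formula.toList with hcs
  set tw := cs.takeWhile gatP with htw
  set dw := cs.dropWhile gatP with hdwdef
  have hsplit : tw ++ dw = cs := List.takeWhile_append_dropWhile
  have hlen : cs.length = tw.length + dw.length := by
    rw [← hsplit]; simp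
  have hdrop1 : cs.drop tw.length = dw := by
    have h := @List.drop_left _ tw dw
    rwa [hsplit] at h
  have htake : cs.take tw.length = tw := by
    have h := @List.take_left _ tw dw
    rwa [hsplit] at h
  have h1 := gatLoop1_eq cs 0 []
  simp only [List.drop_zero, List.nil_append, Nat.zero_add, ← htw] at h1
  set k := dw.findIdx gatP with hk
  have h2 : gatLoop2 cs tw.length = tw.length + k := by
    rw [gatLoop2_eq cs tw.length, hdrop1]
  have hfle : k ≤ dw.length := List.findIdx_le_length
  have htok : cs.length - dw.length = tw.length := by omega
  have hdrop2 : cs.drop (gatLoop2 cs tw.length) = dw.drop k := by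
    rw [h2, ← hdrop1, List.drop_drop]
  have hrest : (if gatLoop2 cs tw.length < cs.length then
      PySem.List.slice cs (some ((gatLoop2 cs tw.length : Nat) : Int)) (some ((cs.length : Nat) : Int))
      else []) = dw.drop k := by
    by_cases h : gatLoop2 cs tw.length < cs.length
    · rw [if_pos h, PySem.List.slice_natCast, List.take_of_length_le (by simp), hdrop2]
    · rw [if_neg h, ← hdrop2]
      exact (List.drop_eq_nil_of_le (by omega)).symm
  simp only [h1, ← hdwdef, ← hk, htok, htake, hrest]
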